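-- pv_equiv track=rewrite | github.com/Gustavo-N5/Consumo-Json-em-python | Funcoes.py | buscarMenor
-- ===== SOURCE A (Python) =====
-- def buscarMenor(lst):
--     i = float("inf")
--     j = 0
--     a = []
--     for nr in lst:
--         a.append(nr)
--         if nr < i and nr != 0:
--             j = a.index(nr) + 1
--             i = nr
--     return f'O menor valor foi {i}, faturado no dia {j}'
-- ===== SOURCE B (Python) =====
-- def buscarMenor(lst):
--     nonzero = [x for x in lst if x != 0]
--     if not nonzero:
--         return f"O menor valor foi {float('inf')}, faturado no dia 0"
--     menor = min(nonzero)
--     dia = lst.index(menor) + 1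
--     return f'O menor valor foi {menor}, faturado no dia {dia}'
-- ===== Notes on version B (the rewrite author's own statement) =====
-- stated objective: simpler
-- what changed: B filters the nonzero values once, takes min() of that list and locates the day with a single lst.index lookup, instead of A's loop that threads a running minimum, grows a copy of the list and re-scans it with a.index on every new minimum.
import Mathlib
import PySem

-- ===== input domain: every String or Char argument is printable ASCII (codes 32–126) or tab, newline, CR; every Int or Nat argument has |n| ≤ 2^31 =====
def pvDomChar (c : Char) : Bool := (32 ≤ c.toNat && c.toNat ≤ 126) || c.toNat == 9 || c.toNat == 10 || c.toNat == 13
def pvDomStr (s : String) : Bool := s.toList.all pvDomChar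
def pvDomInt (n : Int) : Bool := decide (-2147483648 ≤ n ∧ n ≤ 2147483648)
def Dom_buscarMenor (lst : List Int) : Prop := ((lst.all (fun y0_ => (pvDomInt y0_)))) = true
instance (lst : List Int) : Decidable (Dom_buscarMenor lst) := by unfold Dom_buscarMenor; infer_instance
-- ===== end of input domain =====

-- B filters the nonzero values once and delegates the minimum to min() and the day to one index lookup, instead of A's running-min loop that re-scans a growing copy of the list (objective: simpler).


-- ===== PORT A =====
-- A's loop state: (i = running minimum, none plays float('inf'); j; a = the growing copy of lst).
def buscarMenorStep (s : Option Int × Int × List Int) (nr : Int) : Option Int × Int × List Int :=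
  let a := s.2.2 ++ [nr]
  if (match s.1 with | none => true | some v => decide (nr < v)) && (nr != 0) then
    (some nr, ((PySem.List.index? a nr).getD 0 : Int) + 1, a)
  else (s.1, s.2.1, a)

def buscarMenorLoop (lst : List Int) : Option Int × Int × List Int :=
  lst.foldl buscarMenorStep (none, 0, [])

def buscarMenor (lst : List Int) : String :=
  let s := buscarMenorLoop lst
  "O menor valor foi " ++ (match s.1 with | none => "inf" | some v => PySem.Int.toStr v)
    ++ ", faturado no dia " ++ PySem.Int.toStr s.2.1

-- ===== PORT B =====
def buscarMenor_alt (lst : List Int) : String :=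
  let nonzero := lst.filter (fun x => x != 0)
  match PySem.List.min? nonzero (fun x => x) with
  | none => "O menor valor foi inf, faturado no dia 0"
  | some menor =>
      let dia : Int := ((PySem.List.index? lst menor).getD 0 : Int) + 1
      "O menor valor foi " ++ PySem.Int.toStr menor ++ ", faturado no dia " ++ PySem.Int.toStr dia

-- ===== PRECONDITION & SPEC =====
def Spec_buscarMenor (lst : List Int) (out : String) : Prop := out = buscarMenor_alt lst
instance (lst : List Int) (out : String) : Decidable (Spec_buscarMenor lst out) := by unfold Spec_buscarMenor; infer_instance

-- ===== CLAIM (what is proved, stated in full; the proofs are below) =====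
def Claim_equal_buscarMenor : Prop := ∀ (lst : List Int), Dom_buscarMenor lst → Spec_buscarMenor lst (buscarMenor lst)

-- ===== LEMMAS AND PROOFS =====

-- Invariant of A's loop over a processed prefix p: the third component is p itself; the running
-- minimum is the least nonzero of p (or none) and j is 1 + its first index (or 0).
def LoopInv (p : List Int) (s : Option Int × Int × List Int) : Prop :=
  s.2.2 = p ∧
  match s.1 with
  | none => p.filter (fun x => x != 0) = [] ∧ s.2.1 = 0
  | some m => m ∈ p ∧ m ≠ 0 ∧ (∀ y ∈ p, y ≠ 0 → m ≤ y) ∧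
      ∃ k, PySem.List.index? p m = some k ∧ s.2.1 = (k : Int) + 1

theorem loopInv_step (p : List Int) (x : Int) (s : Option Int × Int × List Int)
    (h : LoopInv p s) : LoopInv (p ++ [x]) (buscarMenorStep s x) := by
  obtain ⟨i, j, a⟩ := s
  obtain ⟨ha, hrest⟩ := h
  simp only at ha hrest
  subst ha
  rcases i with _ | m
  · -- running min is inf
    obtain ⟨hfil, hj⟩ := hrest
    by_cases hx0 : x = 0
    · -- does not fire
      subst hx0
      refine ⟨by simp [buscarMenorStep], ?_⟩
      simp only [buscarMenorStep]
      rw [if_neg (by simp)]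
      exact ⟨by rw [List.filter_append, hfil]; simp, hj⟩
    · -- fires; x ∉ a since a has no nonzeros
      have hxnotp : x ∉ a := by
        intro hxp
        have : x ∈ a.filter (fun x => x != 0) := by simp [List.mem_filter, hxp, hx0]
        rw [hfil] at this; simp at this
      simp only [buscarMenorStep]
      rw [if_pos (by simp [hx0])]
      refine ⟨rfl, ?_⟩
      refine ⟨by simp, hx0, ?_, a.length, PySem.List.index?_append_singleton_self a x hxnotp, ?_⟩
      · intro y hy hy0
        rcases List.mem_append.mp hy with hy | hy
        · exfalso
          have : y ∈ a.filter (fun x => x != 0) := by simp [List.mem_filter, hy, hy0]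
          rw [hfil] at this; simp at this
        · simp at hy; omega
      · simp only [PySem.List.index?_append_singleton_self a x hxnotp, Option.getD_some]
  · -- running min is m
    obtain ⟨hm, hm0, hmin, k, hk, hj⟩ := hrest
    by_cases hfire : x < m ∧ x ≠ 0
    · -- fires; x ∉ a since x < min of nonzeros of a
      have hxnotp : x ∉ a := by
        intro hxp
        have := hmin x hxp hfire.2
        omega
      simp only [buscarMenorStep]
      rw [if_pos (by simp [hfire.1, hfire.2])]
      refine ⟨rfl, by simp, hfire.2, ?_, a.length,
        PySem.List.index?_append_singleton_self a x hxnotp, ?_⟩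
      · intro y hy hy0
        rcases List.mem_append.mp hy with hy | hy
        · have := hmin y hy hy0; omega
        · simp at hy; omega
      · simp only [PySem.List.index?_append_singleton_self a x hxnotp, Option.getD_some]
    · -- does not fire
      simp only [buscarMenorStep]
      rw [if_neg (by simpa using hfire)]
      refine ⟨rfl, List.mem_append_left _ hm, hm0, ?_, k, ?_, hj⟩
      · intro y hy hy0
        rcases List.mem_append.mp hy with hy | hy
        · exact hmin y hy hy0
        · simp at hy; subst hy
          rcases not_and_or.mp hfire with h1 | h1
          · omega
          · exact absurd (not_not.mp h1) hy0
      · exact (PySem.List.index?_append_of_mem [x] hm) ▸ hk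

theorem loopInv_holds (lst : List Int) : LoopInv lst (buscarMenorLoop lst) := by
  induction lst using List.reverseRecOn with
  | nil => exact ⟨rfl, rfl, rfl⟩
  | append_singleton p x ih =>
    have : buscarMenorLoop (p ++ [x]) = buscarMenorStep (buscarMenorLoop p) x := by
      simp [buscarMenorLoop, List.foldl_append]
    rw [this]
    exact loopInv_step p x _ ih

-- ===== VERDICT (by name: the statement is the Claim_ definition above) =====
theorem buscarMenor_spec : Claim_equal_buscarMenor := by
  intro lst _
  unfold Spec_buscarMenor buscarMenor buscarMenor_alt
  obtain ⟨ha, hrest⟩ := loopInv_holds lst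
  rcases hc : (buscarMenorLoop lst).1 with _ | m
  · rw [hc] at hrest
    obtain ⟨hfil, hj⟩ := hrest
    rw [hfil]
    simp only [PySem.List.min?, hc, hj]
    rfl
  · rw [hc] at hrest
    obtain ⟨hm, hm0, hmin, k, hk, hj⟩ := hrest
    have hmf : m ∈ lst.filter (fun x => x != 0) := by
      simp [List.mem_filter, hm, hm0]
    rcases hmin? : PySem.List.min? (lst.filter (fun x => x != 0)) (fun x => x) with _ | m2
    · rw [PySem.List.min?_eq_none_iff] at hmin?
      rw [hmin?] at hmf; simp at hmf
    · have hm2mem : m2 ∈ lst.filter (fun x => x != 0) := PySem.List.min?_mem hmin?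
      have h1 : m2 ≤ m := PySem.List.min?_isMin hmin? m hmf
      have h2 : m ≤ m2 := by
        rw [List.mem_filter] at hm2mem
        exact hmin m2 hm2mem.1 (by simpa using hm2mem.2)
      have hmm : m2 = m := le_antisymm h1 h2
      subst hmm
      simp only [hc, hmin?, hj, hk]
      rfl
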